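-- pv_equiv track=rewrite | github.com/sebastianromero07/compiladores | app.py | tokenize_rhs
-- ===== SOURCE A (Python) =====
-- def tokenize_rhs(rhs_text):
--     """Tokeniza el lado derecho de una producción"""
--     rhs_symbols = []
--     i = 0
--     while i < len(rhs_text):
--         if rhs_text[i].isspace():
--             i += 1
--             continue
--         elif rhs_text[i] == "'":
--             # Terminal entre comillas simples
--             i += 1  # saltar primera comilla
--             terminal = ''
--             while i < len(rhs_text) and rhs_text[i] != "'":
--                 terminal += rhs_text[i]
--                 i += 1
--             if i < len(rhs_text) and rhs_text[i] == "'":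
--                 i += 1  # saltar segunda comilla
--             rhs_symbols.append(terminal)
--         elif rhs_text[i] in '()':
--             rhs_symbols.append(rhs_text[i])
--             i += 1
--         else:
--             # Recoger símbolo completo
--             symbol = ''
--             while i < len(rhs_text) and not rhs_text[i].isspace() and rhs_text[i] not in "()'":
--                 symbol += rhs_text[i]
--                 i += 1
--             if symbol:
--                 rhs_symbols.append(symbol)
--
--     return rhs_symbols
-- ===== SOURCE B (Python) =====
-- def tokenize_rhs(rhs_text):
--     """Tokeniza el lado derecho de una producción (suffix-consuming rewrite)"""
--     tokens = []
--     s = rhs_text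
--     while s:
--         c, s = s[0], s[1:]
--         if c.isspace():
--             continue
--         if c == "'":
--             terminal, _, s = s.partition("'")
--             tokens.append(terminal)
--         elif c in '()':
--             tokens.append(c)
--         else:
--             j = next((k for k, ch in enumerate(s) if ch.isspace() or ch in "()'"), len(s))
--             tokens.append(c + s[:j])
--             s = s[j:]
--     return tokens
-- ===== Notes on version B (the rewrite author's own statement) =====
-- stated objective: faster
-- what changed: A's explicit index machine (a position counter with two inner character-by-character string-concatenation while loops) is replaced by a suffix-consuming scanner that pops the head character and splits off whole tokens at once with str.partition for quoted terminals and a first-delimiter split for symbols.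
import Mathlib
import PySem

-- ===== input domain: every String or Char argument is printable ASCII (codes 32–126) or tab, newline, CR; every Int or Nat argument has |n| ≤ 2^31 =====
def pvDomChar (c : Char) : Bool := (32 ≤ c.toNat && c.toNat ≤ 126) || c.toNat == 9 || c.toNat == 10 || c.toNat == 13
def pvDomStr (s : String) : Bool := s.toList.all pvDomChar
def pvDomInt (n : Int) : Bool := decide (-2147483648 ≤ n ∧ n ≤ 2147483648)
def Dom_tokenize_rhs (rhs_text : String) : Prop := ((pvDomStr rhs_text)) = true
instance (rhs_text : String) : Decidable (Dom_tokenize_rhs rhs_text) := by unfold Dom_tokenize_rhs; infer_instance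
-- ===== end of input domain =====

-- B rewrites A's index machine (with its quadratic character-by-character token
-- concatenation) as a suffix-consuming scanner that splits off whole tokens at once
-- (str.partition / first-delimiter split) — objective: faster (measured).

-- ===== PORT A =====
-- A's inner quote-collecting while loop (terminal, i are the loop state)
def pvTermLoop (cs : List Char) (i : Nat) (terminal : List Char) : List Char × Nat :=
  if h : i < cs.length then
    if !((cs[i]'h) == '\'') then pvTermLoop cs (i + 1) (terminal ++ [cs[i]'h])
    else (terminal, i)
  else (terminal, i)
termination_by cs.length - i
decreasing_by exact Nat.sub_succ_lt_self _ _ ‹_›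

-- A's symbol condition: not rhs_text[i].isspace() and rhs_text[i] not in "()'"
def pvSymCond (c : Char) : Bool := !PySem.Chars.isspace c && !(c == '(' || c == ')' || c == '\'')

-- A's inner symbol-collecting while loop (symbol, i are the loop state)
def pvSymLoop (cs : List Char) (i : Nat) (symbol : List Char) : List Char × Nat :=
  if h : i < cs.length then
    if pvSymCond (cs[i]'h) then pvSymLoop cs (i + 1) (symbol ++ [cs[i]'h])
    else (symbol, i)
  else (symbol, i)
termination_by cs.length - i
decreasing_by exact Nat.sub_succ_lt_self _ _ ‹_›

theorem pvTermLoop_le (cs : List Char) (i : Nat) (acc : List Char) : i ≤ (pvTermLoop cs i acc).2 := by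
  rw [pvTermLoop]
  split
  · split
    · have := pvTermLoop_le cs (i + 1) (acc ++ [cs[i]])
      omega
    · simp
  · simp
termination_by cs.length - i

theorem pvSymLoop_le (cs : List Char) (i : Nat) (acc : List Char) : i ≤ (pvSymLoop cs i acc).2 := by
  rw [pvSymLoop]
  split
  · split
    · have := pvSymLoop_le cs (i + 1) (acc ++ [cs[i]])
      omega
    · simp
  · simp
termination_by cs.length - i

theorem pvSubLt (n i j : Nat) (hi : i < n) (hij : i < j) : n - j < n - i :=
  Nat.sub_lt_sub_left hi hij

-- A's outer while loop over the index i (out = rhs_symbols).  The inner symbol loop's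
-- first iteration is unrolled (its guard is exactly the outer else-branch condition).
def pvTokALoop (cs : List Char) (i : Nat) (out : List String) : List String :=
  if h : i < cs.length then
    let c := cs[i]'h
    if PySem.Chars.isspace c then pvTokALoop cs (i + 1) out
    else if c == '\'' then
      let r := pvTermLoop cs (i + 1) []
      let j := if h2 : r.2 < cs.length then (if (cs[r.2]'h2) == '\'' then r.2 + 1 else r.2) else r.2
      pvTokALoop cs j (out ++ [String.ofList r.1])
    else if c == '(' || c == ')' then
      pvTokALoop cs (i + 1) (out ++ [String.ofList [c]])
    else
      let r := pvSymLoop cs (i + 1) [c]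
      pvTokALoop cs r.2 (if r.1.isEmpty then out else out ++ [String.ofList r.1])
  else out
termination_by cs.length - i
decreasing_by
  · exact Nat.sub_succ_lt_self _ _ ‹_›
  · refine pvSubLt cs.length i _ ‹_› ?_
    have hle := Nat.lt_of_succ_le (pvTermLoop_le cs (i + 1) [])
    split
    · split
      · exact Nat.lt_succ_of_lt hle
      · exact hle
    · exact hle
  · exact Nat.sub_succ_lt_self _ _ ‹_›
  · exact pvSubLt cs.length i _ ‹_› (Nat.lt_of_succ_le (pvSymLoop_le cs (i + 1) [cs[i]]))

def tokenize_rhs (rhs_text : String) : List String := pvTokALoop rhs_text.toList 0 []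

-- ===== PORT B =====
-- Source B's delimiter test: ch.isspace() or ch in "()'"
def pvDelim (c : Char) : Bool := PySem.Chars.isspace c || c == '(' || c == ')' || c == '\''

-- Source B's suffix-consuming loop: pop the head char, then partition / split off a prefix
def pvTokB : List Char → List String
  | [] => []
  | c :: rest =>
    if PySem.Chars.isspace c then pvTokB rest
    else if c == '\'' then
      -- terminal, _, s = s.partition("'")
      String.ofList (rest.takeWhile (fun ch => !(ch == '\''))) ::
        pvTokB ((rest.dropWhile (fun ch => !(ch == '\''))).drop 1)
    else if c == '(' || c == ')' then
      String.ofList [c] :: pvTokB rest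
    else
      -- j = first delimiter position (len(s) if none); append c + s[:j]; s = s[j:]
      String.ofList (c :: rest.takeWhile (fun ch => !pvDelim ch)) ::
        pvTokB (rest.dropWhile (fun ch => !pvDelim ch))
termination_by s => s.length
decreasing_by
  · exact Nat.lt_succ_self _
  · simp only [List.length_drop, List.length_cons]
    exact Nat.lt_succ_of_le (Nat.le_trans (Nat.sub_le _ _)
      (List.length_dropWhile_le (fun ch => !(ch == '\'')) rest))
  · exact Nat.lt_succ_self _
  · simp only [List.length_cons]
    exact Nat.lt_succ_of_le (List.length_dropWhile_le (fun ch => !pvDelim ch) rest)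

def tokenize_rhs_alt (rhs_text : String) : List String := pvTokB rhs_text.toList

-- ===== PRECONDITION & SPEC =====
def Spec_tokenize_rhs (rhs_text : String) (out : List String) : Prop := out = tokenize_rhs_alt rhs_text
instance (rhs_text : String) (out : List String) : Decidable (Spec_tokenize_rhs rhs_text out) := by unfold Spec_tokenize_rhs; infer_instance

-- ===== CLAIM (what is proved, stated in full; the proofs are below) =====
def Claim_equal_tokenize_rhs : Prop := ∀ (rhs_text : String), Dom_tokenize_rhs rhs_text → Spec_tokenize_rhs rhs_text (tokenize_rhs rhs_text)

-- ===== LEMMAS AND PROOFS =====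

-- dropping past the collected prefix of a takeWhile lands on the dropWhile suffix
theorem pvDrop_takeWhile_length {α : Type} (p : α → Bool) (l : List α) :
    l.drop (l.takeWhile p).length = l.dropWhile p := by
  induction l with
  | nil => simp
  | cons a l ih =>
    by_cases h : p a
    · simp [List.takeWhile_cons_of_pos h, List.dropWhile_cons_of_pos h, ih]
    · simp [List.takeWhile_cons_of_neg h, List.dropWhile_cons_of_neg h]

-- A's quote-collecting loop collects exactly takeWhile (≠ ') of the suffix at i
theorem pvTermLoop_spec (cs : List Char) (i : Nat) (acc : List Char) :
    pvTermLoop cs i acc =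
      (acc ++ (cs.drop i).takeWhile (fun ch => !(ch == '\'')),
       i + ((cs.drop i).takeWhile (fun ch => !(ch == '\''))).length) := by
  rw [pvTermLoop]
  by_cases h : i < cs.length
  · rw [List.drop_eq_getElem_cons h]
    by_cases hq : cs[i] == '\''
    · simp [h, hq]
    · have hrec := pvTermLoop_spec cs (i + 1) (acc ++ [cs[i]])
      simp only [h, dif_pos, hq, Bool.not_false, if_true, hrec, List.takeWhile_cons]
      simp
      omega
  · rw [List.drop_eq_nil_of_le (by omega)]
    simp [h]
termination_by cs.length - i

-- A's symbol-collecting loop collects exactly takeWhile pvSymCond of the suffix at i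
theorem pvSymLoop_spec (cs : List Char) (i : Nat) (acc : List Char) :
    pvSymLoop cs i acc =
      (acc ++ (cs.drop i).takeWhile pvSymCond,
       i + ((cs.drop i).takeWhile pvSymCond).length) := by
  rw [pvSymLoop]
  by_cases h : i < cs.length
  · rw [List.drop_eq_getElem_cons h]
    by_cases hq : pvSymCond cs[i]
    · have hrec := pvSymLoop_spec cs (i + 1) (acc ++ [cs[i]])
      simp only [h, dif_pos, hq, if_true, hrec, List.takeWhile_cons]
      simp
      omega
    · simp [h, hq]
  · rw [List.drop_eq_nil_of_le (by omega)]
    simp [h]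
termination_by cs.length - i

-- B's delimiter test is the negation of A's symbol condition
theorem pvSymCond_eq (c : Char) : (fun ch => !pvDelim ch) c = pvSymCond c := by
  simp [pvDelim, pvSymCond, Bool.not_or, Bool.and_assoc]

-- Main invariant: A's index machine at i equals out ++ B on the suffix at i
theorem pvLoop_eq (cs : List Char) (i : Nat) (out : List String) :
    pvTokALoop cs i out = out ++ pvTokB (cs.drop i) := by
  rw [pvTokALoop]
  by_cases h : i < cs.length
  · have hdrop : cs.drop i = cs[i] :: cs.drop (i + 1) := List.drop_eq_getElem_cons h
    rw [hdrop, pvTokB]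
    by_cases hsp : PySem.Chars.isspace cs[i]
    · simpa [h, hsp] using pvLoop_eq cs (i + 1) out
    · by_cases hq : cs[i] == '\''
      · -- quoted-terminal branch
        have hterm := pvTermLoop_spec cs (i + 1) []
        set p : Char → Bool := fun ch => !(ch == '\'') with hp
        set tw := (cs.drop (i + 1)).takeWhile p with htw
        have hj : cs.drop (i + 1 + tw.length) = (cs.drop (i + 1)).dropWhile p := by
          rw [← List.drop_drop, pvDrop_takeWhile_length]
        -- the optional closing quote
        have hnext : cs.drop
            (if h2 : i + 1 + tw.length < cs.length then
               (if (cs[i + 1 + tw.length]'h2) == '\'' then i + 1 + tw.length + 1 else i + 1 + tw.length)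
             else i + 1 + tw.length)
            = ((cs.drop (i + 1)).dropWhile p).drop 1 := by
          by_cases h2 : i + 1 + tw.length < cs.length
          · have hcons : cs.drop (i + 1 + tw.length) =
                cs[i + 1 + tw.length] :: cs.drop (i + 1 + tw.length + 1) :=
              List.drop_eq_getElem_cons h2
            have hne : (cs.drop (i + 1)).dropWhile p ≠ [] := by
              rw [← hj]
              simp only [ne_eq, List.drop_eq_nil_iff, not_le]
              omega
            have hh? : ((cs.drop (i + 1)).dropWhile p).head? = some cs[i + 1 + tw.length] := by
              rw [← hj, hcons]
              rfl
            have hhead : ((cs.drop (i + 1)).dropWhile p).head hne = cs[i + 1 + tw.length] := by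
              have h3 := List.head?_eq_some_head hne
              rw [hh?] at h3
              exact (Option.some_inj.mp h3).symm
            have hhd : (cs[i + 1 + tw.length]'h2) == '\'' := by
              have h4 := List.head_dropWhile_not p hne
              rw [hhead] at h4
              simpa [hp] using h4
            simp only [h2, dif_pos, hhd, if_true]
            rw [← hj, hcons]
            simp
          · have hnil : cs.drop (i + 1 + tw.length) = [] := List.drop_eq_nil_of_le (by omega)
            simp only [h2, dif_neg, not_false_iff]
            rw [hnil, ← hj, hnil]
            simp
      -- combine
        have hrec := pvLoop_eq cs
          (if h2 : i + 1 + tw.length < cs.length then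
             (if (cs[i + 1 + tw.length]'h2) == '\'' then i + 1 + tw.length + 1 else i + 1 + tw.length)
           else i + 1 + tw.length)
          (out ++ [String.ofList tw])
        rw [hnext] at hrec
        simp only [h, dif_pos, hsp, hq, Bool.false_eq_true, if_false, if_true]
        rw [hterm]
        simp only [List.nil_append]
        rw [hrec]
        simp
      · by_cases hpar : cs[i] == '(' || cs[i] == ')'
        · -- paren branch
          have hrec := pvLoop_eq cs (i + 1) (out ++ [String.ofList [cs[i]]])
          simp only [h, dif_pos, hsp, if_false, hq, hpar, if_true, Bool.false_eq_true]
          rw [hrec]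
          simp
        · -- symbol branch
          have hsym := pvSymLoop_spec cs (i + 1) [cs[i]]
          set tw := (cs.drop (i + 1)).takeWhile pvSymCond with htw
          have hj : cs.drop (i + 1 + tw.length) = (cs.drop (i + 1)).dropWhile pvSymCond := by
            rw [← List.drop_drop, pvDrop_takeWhile_length]
          have hrec := pvLoop_eq cs (i + 1 + tw.length) (out ++ [String.ofList (cs[i] :: tw)])
          rw [hj] at hrec
          have htwB : (cs.drop (i + 1)).takeWhile (fun ch => !pvDelim ch) = tw := by
            rw [htw]; congr 1; funext ch; exact pvSymCond_eq ch
          have hdwB : (cs.drop (i + 1)).dropWhile (fun ch => !pvDelim ch) =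
              (cs.drop (i + 1)).dropWhile pvSymCond := by
            congr 1; funext ch; exact pvSymCond_eq ch
          simp only [h, dif_pos, hsp, if_false, hq, hpar, Bool.false_eq_true]
          simp only [hsym, htw]
          rw [htwB, hdwB]
          simp only [List.singleton_append, List.isEmpty_cons, Bool.false_eq_true, if_false]
          rw [hrec]
          simp
  · rw [List.drop_eq_nil_of_le (by omega), pvTokB]
    simp [h]
termination_by cs.length - i
decreasing_by all_goals (first | omega | (split_ifs <;> omega))

-- ===== VERDICT (by name: the statement is the Claim_ definition above) =====
theorem tokenize_rhs_spec : Claim_equal_tokenize_rhs := by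
  intro s _
  unfold Spec_tokenize_rhs tokenize_rhs tokenize_rhs_alt
  simpa using pvLoop_eq s.toList 0 []
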